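-- pv_equiv track=rewrite | github.com/AndreyFerral/MethodsOptimization | differential_rents.py | calculate_plan
-- ===== SOURCE A (Python) =====
-- eq = [
--     [1, 2, 3, 1, 5, 120],
--     [6, 3, 4, 5, 2, 50],
--     [8, 2, 1, 9, 3, 200],
--     [120, 60, 40, 30, 120, 370]
-- ]
--
-- row = len(eq)
--
-- col = len(eq[0])
--
-- def calculate_plan(needs, reserves):
--     # Получаем очередность перемещения товара
--     order = get_order()
--     # Подготавливаем матрицу для плана
--     plan = [[0]*(col-1) for i in range(row-1)]
--
--     # Распределяем груз по точкам
--     for i in range(len(order)):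
--         m = order[i][0]
--         n = order[i][1]
--         # Если больше нет потребности или запаса
--         if reserves[m] == 0 or needs[n] == 0:
--             continue
--         # Если запаса больше потребностей
--         elif reserves[m] >= needs[n]:
--             plan[m][n] = needs[n]
--             reserves[m] = reserves[m] - needs[n]
--             needs[n] = 0
--         # Если потребностей больше запаса
--         else:
--             plan[m][n] = reserves[m]
--             needs[n] = needs[n] - reserves[m]
--             reserves[m] = 0
--
--     return plan, needs, reserves
--
-- def get_min_elements():
--     # Подготавливаем список с минимальными элементами
--     minimal_elements = [[0]*(col-1) for i in range(row-1)]
--     # Заполняем матрицу минимальными элементами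
--     for j in range(col-1):
--         # Составляем список для поиска мин элемента
--         list_less = []
--         for i in range(row-1):
--             list_less.append(eq[i][j])
--         # Добавляем мин элемент в матрицу
--         number_min = min(list_less)
--         for i in range(row-1):
--             if eq[i][j] == number_min:
--                 minimal_elements[i][j] = number_min
--     return minimal_elements
--
-- def get_order():
--     order = []
--     min_elements = get_min_elements()
--     # Добавляем в очередь элементы с одним заполнением
--     for i in range(row-1):
--         for j in range(col-1):
--             if min_elements[i][j] != 0:
--                 if is_suitable(min_elements, i, j):
--                     order.append([i, j])
--                     min_elements[i][j] = -1
--     # Добавляем в очередь остальные элементы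
--     for i in range(row-1):
--         for j in range(col-1):
--             if min_elements[i][j] != 0 and min_elements[i][j] != -1:
--                 order.append([i, j])
--     return order
--
-- def is_suitable(order_support, i, j):
--     # True - единственное заполнение
--     check_row = True # в строке
--     check_col = True # в столбце
--
--     for n in range(col-1):
--         # Проверяем по строке
--         if order_support[i][n] != 0 and n != j:
--             check_row = False
--         # Проверяем по столбцу
--         if n < row-1:
--             if order_support[n][j] != 0 and n != i:
--                 check_col = False
--
--     # Возвращаем true, если есть одно заполнения
--     return check_row or check_col
-- ===== SOURCE B (Python) =====
-- eq = [
--     [1, 2, 3, 1, 5, 120],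
--     [6, 3, 4, 5, 2, 50],
--     [8, 2, 1, 9, 3, 200],
--     [120, 60, 40, 30, 120, 370]
-- ]
--
-- row = len(eq)
-- col = len(eq[0])
--
-- def build_order():
--     # column minima of the cost part of eq
--     col_min = [min(eq[i][j] for i in range(row - 1)) for j in range(col - 1)]
--     # the cells holding their column's minimum, in row-major order
--     cells = [(i, j) for i in range(row - 1) for j in range(col - 1)
--              if eq[i][j] == col_min[j]]
--     # occupancy counts per row and per column
--     row_cnt = [0] * (row - 1)
--     col_cnt = [0] * (col - 1)
--     for i, j in cells:
--         row_cnt[i] += 1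
--         col_cnt[j] += 1
--     # a cell is a priority move when it is the only min-cell of its row or column
--     priority = [c for c in cells if row_cnt[c[0]] == 1 or col_cnt[c[1]] == 1]
--     rest = [c for c in cells if row_cnt[c[0]] != 1 and col_cnt[c[1]] != 1]
--     return priority + rest
--
-- def calculate_plan(needs, reserves):
--     order = build_order()
--     plan = [[0] * (col - 1) for _ in range(row - 1)]
--     for m, n in order:
--         r = reserves[m]
--         d = needs[n]
--         if r == 0 or d == 0:
--             continue
--         x = min(r, d)
--         plan[m][n] = x
--         needs[n] = d - x
--         reserves[m] = r - x
--     return plan, needs, reserves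
-- ===== Notes on version B (the rewrite author's own statement) =====
-- stated objective: simpler
-- what changed: B builds the move order in one restructured pass (column minima, min-cells collected row-major, priority decided by per-row/per-column occupancy counts) instead of A's mutate-and-rescan construction with is_suitable re-scans and -1 sentinels, and folds min(r,d) in the allocation loop instead of a three-branch update.
import Mathlib
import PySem

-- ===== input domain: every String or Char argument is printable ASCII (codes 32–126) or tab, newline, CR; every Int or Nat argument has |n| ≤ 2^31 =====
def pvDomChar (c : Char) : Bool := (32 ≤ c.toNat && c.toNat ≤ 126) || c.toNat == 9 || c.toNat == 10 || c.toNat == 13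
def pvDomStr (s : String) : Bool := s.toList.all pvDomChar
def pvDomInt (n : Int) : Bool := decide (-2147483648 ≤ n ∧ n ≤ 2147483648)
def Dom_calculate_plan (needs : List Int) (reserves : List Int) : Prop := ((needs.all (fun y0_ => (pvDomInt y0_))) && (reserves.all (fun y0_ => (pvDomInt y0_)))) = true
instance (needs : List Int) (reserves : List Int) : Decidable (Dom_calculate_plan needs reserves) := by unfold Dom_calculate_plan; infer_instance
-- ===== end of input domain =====

-- B replaces A's mutate-and-rescan order construction (is_suitable re-scans, -1 sentinels)
-- by a single pass over column minima with per-row/per-column occupancy counts (objective: simpler).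
-- Note: the Python A (and B alike) mutates `needs`/`reserves` in place; the equivalence proved
-- here is about the returned triple, whose last two components are exactly those mutated lists.

-- ===== PORT A =====
-- module constant eq, row = 4, col = 6
def pvEq : List (List Int) :=
  [[1, 2, 3, 1, 5, 120],
   [6, 3, 4, 5, 2, 50],
   [8, 2, 1, 9, 3, 200],
   [120, 60, 40, 30, 120, 370]]

-- eq[i][j] for the in-range nonnegative indices the loops produce
def pvEqAt (i j : Int) : Int :=
  PySem.List.pyGetD (PySem.List.pyGetD pvEq i []) j 0

-- get_min_elements()
def pvGetMinElements : List (List Int) :=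
  -- minimal_elements = [[0]*(col-1) for i in range(row-1)], then filled column by column
  (PySem.List.pyRange 0 5 1).foldl
    (fun me j =>
      -- list_less = [eq[i][j] for i in range(row-1)]
      let list_less := (PySem.List.pyRange 0 3 1).map (fun i => pvEqAt i j)
      -- number_min = min(list_less)  (list_less is nonempty, so the default is never used)
      let number_min := (PySem.List.min? list_less (fun x => x)).getD 0
      (PySem.List.pyRange 0 3 1).foldl
        (fun me i =>
          if pvEqAt i j = number_min then
            PySem.List.pySetD me i
              (PySem.List.pySetD (PySem.List.pyGetD me i []) j number_min)
          else me)
        me)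
    ((PySem.List.pyRange 0 3 1).map (fun _ => List.replicate 5 (0 : Int)))

-- is_suitable(order_support, i, j)
def pvIsSuitable (order_support : List (List Int)) (i j : Int) : Bool :=
  let checks := (PySem.List.pyRange 0 5 1).foldl
    (fun (cks : Bool × Bool) n =>
      let ck_row := if PySem.List.pyGetD (PySem.List.pyGetD order_support i []) n 0 ≠ 0 ∧ n ≠ j
                    then false else cks.1
      let ck_col := if n < 3 then
                      (if PySem.List.pyGetD (PySem.List.pyGetD order_support n []) j 0 ≠ 0 ∧ n ≠ i
                       then false else cks.2)
                    else cks.2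
      (ck_row, ck_col))
    (true, true)
  checks.1 || checks.2

-- get_order(); cells [i, j] are ported as pairs (i, j)
def pvGetOrder : List (Int × Int) :=
  -- first nested loop: priority cells, marking min_elements[i][j] = -1
  let st := (PySem.List.pyRange 0 3 1).foldl
    (fun (st : List (Int × Int) × List (List Int)) i =>
      (PySem.List.pyRange 0 5 1).foldl
        (fun (st : List (Int × Int) × List (List Int)) j =>
          let (order, me) := st
          if PySem.List.pyGetD (PySem.List.pyGetD me i []) j 0 ≠ 0 then
            if pvIsSuitable me i j then
              (order ++ [(i, j)],
               PySem.List.pySetD me i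
                 (PySem.List.pySetD (PySem.List.pyGetD me i []) j (-1)))
            else st
          else st)
        st)
    ([], pvGetMinElements)
  -- second nested loop: the remaining cells
  (PySem.List.pyRange 0 3 1).foldl
    (fun order i =>
      (PySem.List.pyRange 0 5 1).foldl
        (fun order j =>
          let v := PySem.List.pyGetD (PySem.List.pyGetD st.2 i []) j 0
          if v ≠ 0 ∧ v ≠ -1 then order ++ [(i, j)] else order)
        order)
    st.1

-- one iteration of A's allocation loop, on the cell order[i] = (m, n)
def pvStepA (st : List (List Int) × List Int × List Int) (mn : Int × Int) :
    List (List Int) × List Int × List Int :=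
  let (plan, needs, reserves) := st
  let m := mn.1
  let n := mn.2
  match PySem.List.pyGet? reserves m, PySem.List.pyGet? needs n with
  | some r, some d =>
    if r = 0 ∨ d = 0 then (plan, needs, reserves)
    else if r ≥ d then
      (PySem.List.pySetD plan m (PySem.List.pySetD (PySem.List.pyGetD plan m []) n d),
       PySem.List.pySetD needs n 0,
       PySem.List.pySetD reserves m (r - d))
    else
      (PySem.List.pySetD plan m (PySem.List.pySetD (PySem.List.pyGetD plan m []) n r),
       PySem.List.pySetD needs n (d - r),
       PySem.List.pySetD reserves m 0)
  | _, _ => (plan, needs, reserves)  -- Python raises IndexError here; excluded by Pre_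

def calculate_plan (needs : List Int) (reserves : List Int) :
    List (List Int) × List Int × List Int :=
  let order := pvGetOrder
  let plan := (PySem.List.pyRange 0 3 1).map (fun _ => List.replicate 5 (0 : Int))
  (PySem.List.pyRange 0 (order.length : Int) 1).foldl
    (fun st i => pvStepA st (PySem.List.pyGetD order i (0, 0)))
    (plan, needs, reserves)

-- ===== PORT B =====
-- build_order(): column minima, min-cells in row-major order, occupancy counts
def pvBuildOrder : List (Int × Int) :=
  let colMin : List Int :=
    (PySem.List.pyRange 0 5 1).map
      (fun j => (PySem.List.min? ((PySem.List.pyRange 0 3 1).map (fun i => pvEqAt i j))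
                   (fun x => x)).getD 0)
  let cells : List (Int × Int) :=
    ((PySem.List.pyRange 0 3 1).flatMap
      (fun i => (PySem.List.pyRange 0 5 1).map (fun j => (i, j)))).filter
      (fun c => pvEqAt c.1 c.2 = PySem.List.pyGetD colMin c.2 0)
  let cnts : List Int × List Int :=
    cells.foldl
      (fun (cnts : List Int × List Int) c =>
        (PySem.List.pySetD cnts.1 c.1 (PySem.List.pyGetD cnts.1 c.1 0 + 1),
         PySem.List.pySetD cnts.2 c.2 (PySem.List.pyGetD cnts.2 c.2 0 + 1)))
      (List.replicate 3 0, List.replicate 5 0)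
  let isPriority : Int × Int → Bool :=
    fun c => PySem.List.pyGetD cnts.1 c.1 0 = 1 ∨ PySem.List.pyGetD cnts.2 c.2 0 = 1
  cells.filter isPriority ++ cells.filter (fun c => ¬ isPriority c)

-- one iteration of B's allocation loop
def pvStepB (st : List (List Int) × List Int × List Int) (mn : Int × Int) :
    List (List Int) × List Int × List Int :=
  let (plan, needs, reserves) := st
  match PySem.List.pyGet? reserves mn.1, PySem.List.pyGet? needs mn.2 with
  | some r, some d =>
    if r = 0 ∨ d = 0 then (plan, needs, reserves)
    else
      let x := min r d
      (PySem.List.pySetD plan mn.1 (PySem.List.pySetD (PySem.List.pyGetD plan mn.1 []) mn.2 x),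
       PySem.List.pySetD needs mn.2 (d - x),
       PySem.List.pySetD reserves mn.1 (r - x))
  | _, _ => (plan, needs, reserves)  -- Python raises IndexError here; excluded by Pre_

def calculate_plan_alt (needs : List Int) (reserves : List Int) :
    List (List Int) × List Int × List Int :=
  let plan := List.replicate 3 (List.replicate 5 (0 : Int))
  pvBuildOrder.foldl pvStepB (plan, needs, reserves)

-- ===== PRECONDITION & SPEC =====
-- Pre_ excludes exactly the inputs on which Python A raises IndexError: the allocation
-- loop reads needs[0..4] and reserves[0..2], so shorter lists make A crash.
def Pre_calculate_plan (needs : List Int) (reserves : List Int) : Prop :=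
  5 ≤ needs.length ∧ 3 ≤ reserves.length
instance (needs : List Int) (reserves : List Int) : Decidable (Pre_calculate_plan needs reserves) := by
  unfold Pre_calculate_plan; infer_instance

def pvWitness_calculate_plan : List Int × List Int := ([10, 20, 30, 40, 50], [60, 70, 80])

def Spec_calculate_plan (needs : List Int) (reserves : List Int)
    (out : List (List Int) × List Int × List Int) : Prop :=
  out = calculate_plan_alt needs reserves
instance (needs : List Int) (reserves : List Int) (out : List (List Int) × List Int × List Int) :
    Decidable (Spec_calculate_plan needs reserves out) := by
  unfold Spec_calculate_plan; infer_instance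

-- ===== CLAIM (what is proved, stated in full; the proofs are below) =====
def Claim_equal_calculate_plan : Prop := ∀ (needs : List Int) (reserves : List Int), Dom_calculate_plan needs reserves → Pre_calculate_plan needs reserves → Spec_calculate_plan needs reserves (calculate_plan needs reserves)

-- ===== LEMMAS AND PROOFS =====

-- the two order constructions produce the same constant queue
theorem pvOrder_eq : pvGetOrder = pvBuildOrder := by decide

-- the two allocation steps agree on every state and cell
theorem pvStep_eq (st : List (List Int) × List Int × List Int) (mn : Int × Int) :
    pvStepA st mn = pvStepB st mn := by
  obtain ⟨plan, needs, reserves⟩ := st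
  simp only [pvStepA, pvStepB]
  cases PySem.List.pyGet? reserves mn.1 with
  | none => rfl
  | some r =>
    cases PySem.List.pyGet? needs mn.2 with
    | none => rfl
    | some d =>
      simp only []
      split_ifs with h0 hge
      · rfl
      · have : min r d = d := by omega
        simp [this]
      · have h1 : min r d = r := by omega
        have h2 : r - min r d = 0 := by omega
        simp [h1]

theorem pv_foldl_step_eq (l : List (Int × Int)) (st : List (List Int) × List Int × List Int) :
    l.foldl pvStepA st = l.foldl pvStepB st := by
  induction l generalizing st with
  | nil => rfl
  | cons c cs ih => simp [List.foldl, pvStep_eq, ih]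

-- ===== VERDICT (by name: the statement is the Claim_ definition above) =====
theorem calculate_plan_spec : Claim_equal_calculate_plan := by
  intro needs reserves _ _
  show calculate_plan needs reserves = calculate_plan_alt needs reserves
  simp only [calculate_plan, calculate_plan_alt]
  rw [PySem.List.foldl_pyRange_zero_pyGetD' pvGetOrder ((0 : Int), (0 : Int)) pvStepA
        ((PySem.List.pyRange 0 3 1).map (fun _ => List.replicate 5 (0 : Int)), needs, reserves)]
  rw [pvOrder_eq, pv_foldl_step_eq]
  rfl
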